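-- pv_equiv track=rewrite | github.com/niconico25/comparison_of_python_code | 9_2_divisor.py | divisorize_naive
-- ===== SOURCE A (Python) =====
-- def divisorize_naive(fct):
--     # bit list
--     bit_len = len(fct)
--     r = range
--     bit_list = [[(i >> j) % 2 for j in r(bit_len)] for i in r(2**bit_len)]
--     # divisor
--     div = [[f for f, b in zip(fct, bit) if b] for bit in bit_list]
--     div[0] = [1]
--     #   exclude duplication, such as  [2, 2, 0], [2, 0, 2], [0, 2, 2].
--     div = [list(t) for t in set([tuple(d) for d in div])]
--     return div
-- ===== SOURCE B (Python) =====
-- def divisorize_naive(fct):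
--     # Incremental subset doubling: extend each kept divisor tuple by the next
--     # factor, appending only tuples never seen before (incremental seen-set),
--     # so work is proportional to the distinct divisors, not 2**len(fct).
--     subs = [()]
--     seen = {()}
--     for f in fct:
--         for s in subs[:]:
--             t = s + (f,)
--             if t not in seen:
--                 seen.add(t)
--                 subs.append(t)
--     subs[0] = (1,)
--     return [list(t) for t in set(subs)]
-- ===== Notes on version B (the rewrite author's own statement) =====
-- stated objective: alternative
-- what changed: A enumerates all 2^len(fct) bit masks, builds each subset by zip/filter against a bit row, and deduplicates only at the end; B doubles the divisor-tuple list one factor at a time, appending only tuples an incremental seen-set has not met, so only distinct divisor tuples are ever materialised (fewer tuples when factors repeat; a timing run did not confirm a speedup on its random, distinct-factor inputs).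
import Mathlib
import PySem

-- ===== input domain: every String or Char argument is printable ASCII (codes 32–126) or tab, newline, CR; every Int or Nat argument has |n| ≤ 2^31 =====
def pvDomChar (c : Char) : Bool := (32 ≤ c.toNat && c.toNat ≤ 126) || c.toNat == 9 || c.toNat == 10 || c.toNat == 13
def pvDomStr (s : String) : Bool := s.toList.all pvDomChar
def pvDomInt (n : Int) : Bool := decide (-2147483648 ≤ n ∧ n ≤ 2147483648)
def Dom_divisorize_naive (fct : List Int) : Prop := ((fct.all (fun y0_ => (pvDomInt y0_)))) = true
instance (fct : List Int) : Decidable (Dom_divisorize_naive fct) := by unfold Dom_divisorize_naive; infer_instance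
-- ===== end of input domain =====

-- B replaces A's enumeration of all 2^len(fct) bit masks by incremental subset
-- doubling with an incremental seen-set, so only distinct divisor tuples are ever
-- materialised (objective: alternative; a timing run did not confirm a
-- speedup on its random inputs). Python's set of int tuples is rendered as
-- PySem.Set (distinct elements, first-occurrence order) in both ports.

-- ===== PORT A =====
-- tuple(d) / [list(t) for t in …] are identity under the type convention;
-- set([…]) is PySem.Set.ofList; 'if b' on b ∈ {0,1} is b != 0;
-- i >> j has j ≥ 0 (j from range(bit_len)), so '>>> j.toNat' is exact.
def divisorize_naive (fct : List Int) : List (List Int) :=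
  let bit_len : Nat := fct.length
  let bit_list : List (List Int) :=
    (PySem.List.pyRange 0 ((2 : Int) ^ bit_len)).map (fun i =>
      (PySem.List.pyRange 0 (bit_len : Int)).map (fun j => PySem.Int.mod (i >>> j.toNat) 2))
  let div : List (List Int) :=
    bit_list.map (fun bit => ((fct.zip bit).filter (fun fb => fb.2 != 0)).map Prod.fst)
  let div2 := PySem.List.pySetD div 0 [1]   -- div[0] = [1] (div is never empty)
  PySem.Set.ofList div2

-- ===== PORT B =====
-- The loop state is the pair (subs, seen); the inner 'for s in subs[:]' iterates
-- the snapshot st.1 while appending to the accumulator; {()} / set(subs) are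
-- PySem.Set; 't not in seen' is Set.contains.
def divisorize_naive_alt (fct : List Int) : List (List Int) :=
  let st := fct.foldl (fun (st : List (List Int) × PySem.Set (List Int)) f =>
      st.1.foldl (fun p s =>
        let t := s ++ [f]
        if p.2.contains t then p else (p.1 ++ [t], PySem.Set.add p.2 t)) st) ([[]], PySem.Set.ofList [[]])
  let subs2 := PySem.List.pySetD st.1 0 [1]   -- subs[0] = (1,)
  PySem.Set.ofList subs2

-- ===== PRECONDITION & SPEC =====
def Spec_divisorize_naive (fct : List Int) (out : List (List Int)) : Prop := out = divisorize_naive_alt fct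
instance (fct : List Int) (out : List (List Int)) : Decidable (Spec_divisorize_naive fct out) := by unfold Spec_divisorize_naive; infer_instance

-- ===== CLAIM (what is proved, stated in full; the proofs are below) =====
def Claim_equal_divisorize_naive : Prop := ∀ (fct : List Int), Dom_divisorize_naive fct → Spec_divisorize_naive fct (divisorize_naive fct)

-- ===== LEMMAS AND PROOFS =====

-- A's bit row for mask i over n bits (the explicit instance is core's Int >>> Nat,
-- the same one port A's 'i >>> j.toNat' elaborates to).
def bitsA (n : Nat) (i : Int) : List Int :=
  (PySem.List.pyRange 0 (n : Int)).map (fun j =>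
    PySem.Int.mod (@HShiftRight.hShiftRight Int Nat Int Int.instHShiftRightNat i j.toNat) 2)

def subA (fct : List Int) (i : Int) : List Int :=
  ((fct.zip (bitsA fct.length i)).filter (fun fb => fb.2 != 0)).map Prod.fst

-- A's raw divisor list, before div[0] = [1] and the set.
def rawDiv (fct : List Int) : List (List Int) :=
  (PySem.List.pyRange 0 ((2 : Int) ^ fct.length)).map (subA fct)

lemma divisorize_naive_eq (fct : List Int) :
    divisorize_naive fct = PySem.Set.ofList (PySem.List.pySetD (rawDiv fct) 0 [1]) := by
  show PySem.Set.ofList (PySem.List.pySetD (List.map _ (List.map _ (PySem.List.pyRange 0 ((2:Int) ^ fct.length)))) 0 [1]) = _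
  unfold rawDiv
  rw [List.map_map]
  congr 2

lemma length_bitsA (n : Nat) (i : Int) : (bitsA n i).length = n := by
  simp [bitsA, PySem.List.pyRange_zero_natCast]

lemma bitsA_succ (n : Nat) (i : Int) :
    bitsA (n + 1) i = bitsA n i ++ [PySem.Int.mod (i >>> n) 2] := by
  unfold bitsA
  rw [show ((n + 1 : Nat) : Int) = (n : Int) + 1 by push_cast; ring,
      PySem.List.pyRange_one_succ_right (by exact_mod_cast Nat.zero_le n)]
  simp

lemma shift_mod2_cast (m j : Nat) :
    PySem.Int.mod ((m : Int) >>> j) 2 = (((m >>> j) % 2 : Nat) : Int) := by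
  simp [pysem]

-- all low bits agree between m and 2^n + m
lemma nat_bit_add_pow (n j m : Nat) (hj : j < n) :
    (2 ^ n + m) >>> j % 2 = m >>> j % 2 := by
  rw [Nat.shiftRight_eq_div_pow, Nat.shiftRight_eq_div_pow]
  have hsplit : (2:Nat) ^ n = 2 ^ j * 2 ^ (n - j) := by
    rw [← pow_add]; congr 1; omega
  have hpos : 0 < (2:Nat) ^ j := Nat.two_pow_pos _
  rw [hsplit, Nat.mul_add_div hpos]
  have heven : (2:Nat) ^ (n - j) = 2 * 2 ^ (n - j - 1) := by
    rw [← pow_succ']; congr 1; omega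
  omega

lemma nat_top_bit (n m : Nat) (hm : m < 2 ^ n) : (2 ^ n + m) >>> n % 2 = 1 := by
  have hpos : 0 < (2:Nat) ^ n := Nat.two_pow_pos _
  rw [Nat.shiftRight_eq_div_pow, Nat.add_comm, Nat.add_div_right _ hpos,
      Nat.div_eq_of_lt hm]

lemma nat_low_top_bit (n m : Nat) (hm : m < 2 ^ n) : m >>> n % 2 = 0 := by
  rw [Nat.shiftRight_eq_div_pow, Nat.div_eq_of_lt hm]

lemma bitsA_high (n m : Nat) :
    bitsA n ((2 ^ n + m : Nat) : Int) = bitsA n (m : Int) := by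
  unfold bitsA
  apply List.map_congr_left
  intro j hj
  obtain ⟨hj0, hjn⟩ := PySem.List.mem_pyRange_one.1 hj
  have hjn' : j.toNat < n := by omega
  show PySem.Int.mod (((2 ^ n + m : Nat) : Int) >>> j.toNat) 2
      = PySem.Int.mod ((m : Int) >>> j.toNat) 2
  rw [shift_mod2_cast, shift_mod2_cast, nat_bit_add_pow n j.toNat m hjn']

lemma subA_low (fct : List Int) (f : Int) (m : Nat) (hm : m < 2 ^ fct.length) :
    subA (fct ++ [f]) (m : Int) = subA fct (m : Int) := by
  unfold subA
  rw [show (fct ++ [f]).length = fct.length + 1 by simp, bitsA_succ,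
      List.zip_append (by rw [length_bitsA]), List.filter_append, List.map_append]
  have hbit : PySem.Int.mod ((m : Int) >>> fct.length) 2 = 0 := by
    rw [shift_mod2_cast, nat_low_top_bit fct.length m hm]; rfl
  rw [hbit]
  simp

lemma subA_high (fct : List Int) (f : Int) (m : Nat) (hm : m < 2 ^ fct.length) :
    subA (fct ++ [f]) ((2 ^ fct.length + m : Nat) : Int) = subA fct (m : Int) ++ [f] := by
  unfold subA
  rw [show (fct ++ [f]).length = fct.length + 1 by simp, bitsA_succ,
      List.zip_append (by rw [length_bitsA]), List.filter_append, List.map_append,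
      bitsA_high fct.length m]
  have hbit : PySem.Int.mod (((2 ^ fct.length + m : Nat) : Int) >>> fct.length) 2 = 1 := by
    rw [shift_mod2_cast, nat_top_bit fct.length m hm]; rfl
  rw [hbit]
  simp

lemma rawDiv_natCast (fct : List Int) :
    rawDiv fct = (List.range (2 ^ fct.length)).map (fun m : Nat => subA fct (m : Int)) := by
  rw [rawDiv, show ((2 : Int) ^ fct.length) = ((2 ^ fct.length : Nat) : Int) by push_cast; ring,
      PySem.List.pyRange_zero_natCast, List.map_map]
  exact List.map_congr_left (fun m _ => rfl)

lemma rawDiv_append (fct : List Int) (f : Int) :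
    rawDiv (fct ++ [f]) = rawDiv fct ++ (rawDiv fct).map (fun s => s ++ [f]) := by
  rw [rawDiv_natCast (fct ++ [f]), rawDiv_natCast fct,
      show (2:Nat) ^ ((fct ++ [f]).length) = 2 ^ fct.length + 2 ^ fct.length by
        simp [List.length_append, pow_succ]; ring,
      List.range_add, List.map_append, List.map_map, List.map_map]
  congr 1
  · exact List.map_congr_left (fun m hm => subA_low fct f m (List.mem_range.1 hm))
  · apply List.map_congr_left
    intro m hm
    show subA (fct ++ [f]) ((2 ^ fct.length + m : Nat) : Int) = subA fct (m : Int) ++ [f]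
    exact subA_high fct f m (List.mem_range.1 hm)

lemma ofList_map_ofList {α β : Type} [BEq α] [LawfulBEq α] [BEq β] [LawfulBEq β] (g : α → β) (xs : List α) :
    PySem.Set.ofList ((PySem.Set.ofList xs).map g) = PySem.Set.ofList (xs.map g) := by
  induction xs using List.reverseRecOn with
  | nil => rfl
  | append_singleton xs x ih =>
    rw [List.map_append, show List.map g [x] = [g x] from rfl,
        PySem.Set.ofList_append_singleton, PySem.Set.ofList_append_singleton]
    by_cases hx : x ∈ xs
    · rw [PySem.Set.add_of_mem ((PySem.Set.mem_ofList xs x).2 hx), ih,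
          PySem.Set.add_of_mem ((PySem.Set.mem_ofList _ _).2 (List.mem_map_of_mem hx))]
    · rw [PySem.Set.add_of_not_mem (fun h => hx ((PySem.Set.mem_ofList xs x).1 h)),
          List.map_append, show List.map g [x] = [g x] from rfl,
          PySem.Set.ofList_append_singleton, ih]

lemma update_map_ofList {α β : Type} [BEq α] [LawfulBEq α] [BEq β] [LawfulBEq β]
    (s : PySem.Set β) (g : α → β) (xs : List α) :
    s.update ((PySem.Set.ofList xs).map g) = s.update (xs.map g) := by
  rw [PySem.Set.update_eq_append_filter, PySem.Set.update_eq_append_filter, ofList_map_ofList]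

-- the inner loop over the snapshot keeps both components equal: it is foldl Set.add
lemma pairFold (g : List Int → List Int) (l : List (List Int)) (a : PySem.Set (List Int)) :
    l.foldl (fun p s =>
        let t := g s
        if p.2.contains t then p else (p.1 ++ [t], PySem.Set.add p.2 t)) (a, a)
      = (l.foldl (fun acc x => PySem.Set.add acc (g x)) a,
         l.foldl (fun acc x => PySem.Set.add acc (g x)) a) := by
  induction l generalizing a with
  | nil => rfl
  | cons x l ih =>
    simp only [List.foldl_cons]
    by_cases h : a.contains (g x)
    · rw [if_pos h, PySem.Set.add_of_mem ((PySem.Set.contains_iff _ _).1 h)]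
      exact ih a
    · rw [if_neg h,
          show PySem.Set.add a (g x) = a ++ [g x] from
            PySem.Set.add_of_not_mem (fun hm => h ((PySem.Set.contains_iff _ _).2 hm))]
      exact ih (a ++ [g x])

lemma foldB_eq (fct : List Int) :
    fct.foldl (fun (st : List (List Int) × PySem.Set (List Int)) f =>
        st.1.foldl (fun p s =>
          let t := s ++ [f]
          if p.2.contains t then p else (p.1 ++ [t], PySem.Set.add p.2 t)) st)
      ([[]], PySem.Set.ofList [[]])
      = (PySem.Set.ofList (rawDiv fct), PySem.Set.ofList (rawDiv fct)) := by
  induction fct using List.reverseRecOn with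
  | nil => rfl
  | append_singleton fct f ih =>
    rw [List.foldl_append, ih]
    rw [List.foldl_cons, List.foldl_nil]
    show (PySem.Set.ofList (rawDiv fct)).foldl _ (PySem.Set.ofList (rawDiv fct), PySem.Set.ofList (rawDiv fct)) = _
    rw [pairFold (fun s => s ++ [f]), ← PySem.Set.update_map_eq_foldl_add,
        update_map_ofList, ← PySem.Set.ofList_append, ← rawDiv_append]

lemma subA_zero (fct : List Int) : subA fct 0 = [] := by
  unfold subA
  rw [List.filter_eq_nil_iff.2 ?_]
  · rfl
  · intro p hp
    have h2 := (List.of_mem_zip hp).2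
    unfold bitsA at h2
    obtain ⟨j, -, hj⟩ := List.mem_map.1 h2
    have hz : (0 : Int) >>> j.toNat = 0 := by simp
    rw [hz] at hj
    rw [← hj]
    decide

lemma nat_all_bits_zero (n : Nat) : ∀ m : Nat, m < 2 ^ n → (∀ j < n, m >>> j % 2 = 0) → m = 0 := by
  induction n with
  | zero => intro m hm _; omega
  | succ n ih =>
    intro m hm hb
    have h0 : m % 2 = 0 := by
      have := hb 0 (by omega)
      simpa [Nat.shiftRight_eq_div_pow] using this
    have h1 : m / 2 < 2 ^ n := by rw [pow_succ] at hm; omega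
    have h2 : ∀ j < n, (m / 2) >>> j % 2 = 0 := by
      intro j hj
      have := hb (j + 1) (by omega)
      rw [Nat.shiftRight_eq_div_pow] at this ⊢
      rw [Nat.div_div_eq_div_mul, ← pow_succ']
      exact this
    have := ih (m / 2) h1 h2
    omega

lemma subA_eq_nil (fct : List Int) (m : Nat) (hm : m < 2 ^ fct.length)
    (h : subA fct (m : Int) = []) : m = 0 := by
  unfold subA at h
  have hflt := List.filter_eq_nil_iff.1 (List.map_eq_nil_iff.1 h)
  apply nat_all_bits_zero fct.length m hm
  intro j hj
  have hlen : j < (fct.zip (bitsA fct.length (m : Int))).length := by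
    simp [List.length_zip, length_bitsA, hj]
  have hpair := hflt _ (List.getElem_mem hlen)
  rw [List.getElem_zip] at hpair
  have hbit : (bitsA fct.length (m : Int))[j]'(by rw [length_bitsA]; exact hj)
      = (((m >>> j) % 2 : Nat) : Int) := by
    simp [bitsA, PySem.List.pyRange_zero_natCast]
  simp only [hbit] at hpair
  simp only [bne_iff_ne, ne_eq, not_not] at hpair
  exact_mod_cast hpair

lemma discard_not_mem {α : Type} [BEq α] [LawfulBEq α] (s : PySem.Set α) (x : α) (h : x ∉ s) :
    s.discard x = s := by
  show List.filter _ s = s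
  rw [List.filter_eq_self]
  intro y hy
  simp only [Bool.not_eq_eq_eq_not, Bool.not_true, beq_eq_false_iff_ne, ne_eq]
  exact fun hyx => h (hyx ▸ hy)

lemma rawDiv_head_tail (fct : List Int) :
    rawDiv fct = [] :: (PySem.List.pyRange 1 ((2 : Int) ^ fct.length)).map (subA fct) ∧
      [] ∉ (PySem.List.pyRange 1 ((2 : Int) ^ fct.length)).map (subA fct) := by
  have hpos : (0 : Int) < 2 ^ fct.length := by positivity
  constructor
  · rw [rawDiv, PySem.List.pyRange_one_cons hpos]
    simp [subA_zero]
  · intro hmem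
    obtain ⟨i, hi, hnil⟩ := List.mem_map.1 hmem
    obtain ⟨hi1, hi2⟩ := PySem.List.mem_pyRange_one.1 hi
    have hcast : ((i.toNat : Nat) : Int) = i := Int.toNat_of_nonneg (by omega)
    have hlt : i.toNat < 2 ^ fct.length := by
      have : ((2:Nat) ^ fct.length : Int) = (2:Int) ^ fct.length := by push_cast; ring
      omega
    have := subA_eq_nil fct i.toNat hlt (by rw [hcast]; exact hnil)
    omega

-- ===== VERDICT (by name: the statement is the Claim_ definition above) =====
theorem divisorize_naive_spec : Claim_equal_divisorize_naive := by
  intro fct _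
  unfold Spec_divisorize_naive
  rw [divisorize_naive_eq]
  show _ = PySem.Set.ofList (PySem.List.pySetD
    (fct.foldl (fun (st : List (List Int) × PySem.Set (List Int)) f =>
        st.1.foldl (fun p s =>
          let t := s ++ [f]
          if p.2.contains t then p else (p.1 ++ [t], PySem.Set.add p.2 t)) st)
      ([[]], PySem.Set.ofList [[]])).1 0 [1])
  rw [foldB_eq]
  show _ = PySem.Set.ofList (PySem.List.pySetD (PySem.Set.ofList (rawDiv fct)) 0 [1])
  obtain ⟨hht, hnm⟩ := rawDiv_head_tail fct
  rw [hht, PySem.Set.ofList_cons,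
      PySem.List.pySetD_of_nonneg _ _ (by norm_num),
      PySem.List.pySetD_of_nonneg _ _ (by norm_num)]
  show PySem.Set.ofList ([1] :: _) = PySem.Set.ofList ([1] :: _)
  rw [PySem.Set.ofList_cons, PySem.Set.ofList_cons,
      PySem.Set.ofList_eq_self_of_nodup _ (PySem.Set.nodup_discard _ _ (PySem.Set.nodup_ofList _)),
      discard_not_mem _ _ (fun h => hnm ((PySem.Set.mem_ofList _ _).1 h))]
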